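-- pv_equiv track=rewrite | github.com/Kelvin-scrapper/RMP_ASHMORE | mapper.py | _numeric_vals_from_row
-- ===== SOURCE A (Python) =====
-- def _numeric_vals_from_row(row, max_vals=2):
--     vals = []
--     i = 1
--     while i < len(row) and len(vals) < max_vals:
--         val = str(row[i]).strip() if row[i] else ""
--         if val.endswith(".") and i + 1 < len(row):
--             nxt = str(row[i + 1]).strip() if row[i + 1] else ""
--             if nxt.replace("-", "").isdigit():
--                 val = val + nxt
--                 i += 1
--         elif val == "-" and i + 1 < len(row):
--             nxt = str(row[i + 1]).strip() if row[i + 1] else ""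
--             if nxt:
--                 val = val + nxt
--                 i += 1
--         if val:
--             clean = val.replace(".", "").replace("-", "").replace("%", "")
--             if clean.isdigit() or val in ("0", "0.0", "0.00"):
--                 vals.append(val)
--         i += 1
--     while len(vals) < max_vals:
--         vals.append("")
--     return vals
-- ===== SOURCE B (Python) =====
-- _TOKEN_CHARS = "0123456789.-%"
--
--
-- def _is_value(tok):
--     # numeric token: only chars from _TOKEN_CHARS and at least one digit
--     return all(ch in _TOKEN_CHARS for ch in tok) and any(ch.isdigit() for ch in tok)
--
--
-- def _dashed_digits(tok):
--     # tok minus '-' signs is a non-empty run of digits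
--     return any(ch.isdigit() for ch in tok) and all(ch == "-" or ch.isdigit() for ch in tok)
--
--
-- def _numeric_vals_from_row(row, max_vals=2):
--     stack = [str(c).strip() if c else "" for c in row[1:]][::-1]
--     found = []
--     while stack:
--         head = stack.pop()
--         if stack and ((head.endswith(".") and _dashed_digits(stack[-1]))
--                       or (head == "-" and stack[-1] != "")):
--             head += stack.pop()
--         if _is_value(head):
--             found.append(head)
--     out = found[:max_vals] if max_vals > 0 else []
--     return out + [""] * (max_vals - len(out))
-- ===== Notes on version B (the rewrite author's own statement) =====
-- stated objective: alternative
-- what changed: Replaced A's index-driven while-loop with early stop and replace-chain numeric tests by a normalize-map pass feeding an explicit stack (pop/peek) merge-and-filter loop whose numeric tests are character-class scans (all chars in '0123456789.-%' and some digit), followed by prefix-take and pad.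
import Mathlib
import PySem

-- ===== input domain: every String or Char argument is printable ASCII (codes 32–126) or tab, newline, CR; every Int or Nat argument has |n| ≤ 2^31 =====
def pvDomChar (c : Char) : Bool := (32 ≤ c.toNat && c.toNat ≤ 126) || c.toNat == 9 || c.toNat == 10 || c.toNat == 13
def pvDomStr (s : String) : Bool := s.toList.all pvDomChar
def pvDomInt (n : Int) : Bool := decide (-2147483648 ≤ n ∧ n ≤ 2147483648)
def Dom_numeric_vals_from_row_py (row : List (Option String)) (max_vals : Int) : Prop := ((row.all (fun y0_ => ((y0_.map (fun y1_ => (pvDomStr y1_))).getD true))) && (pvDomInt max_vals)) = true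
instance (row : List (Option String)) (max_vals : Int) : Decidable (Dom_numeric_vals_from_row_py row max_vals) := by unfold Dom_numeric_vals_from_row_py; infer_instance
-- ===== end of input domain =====

-- B replaces A's index-driven while-loop (early stop, replace-chain numeric tests) by a
-- normalize-map pass feeding an explicit stack loop with character-class numeric tests,
-- then prefix-take and pad (objective: alternative).

-- ===== PORT A =====
def pvCellA (c : Option String) : String :=
  match c with
  | none => ""
  | some s => if s = "" then "" else PySem.Str.strip s

-- merged value at index i plus the index actually consumed (i or i+1)
def pvStepA (row : List (Option String)) (i : Nat) : String × Nat :=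
  let val := pvCellA (row.getD i none)
  if PySem.Str.endswith val "." && decide (i + 1 < row.length) then
    let nxt := pvCellA (row.getD (i + 1) none)
    if PySem.Str.strIsdigit (PySem.Str.replace nxt "-" "") then (val ++ nxt, i + 1) else (val, i)
  else if val == "-" && decide (i + 1 < row.length) then
    let nxt := pvCellA (row.getD (i + 1) none)
    if nxt ≠ "" then (val ++ nxt, i + 1) else (val, i)
  else (val, i)

theorem pvStepA_snd_ge (row : List (Option String)) (i : Nat) : i ≤ (pvStepA row i).2 := by
  unfold pvStepA
  dsimp only
  split_ifs <;> simp

def pvKeepA (val : String) : Bool :=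
  let clean := PySem.Str.replace (PySem.Str.replace (PySem.Str.replace val "." "") "-" "") "%" ""
  PySem.Str.strIsdigit clean || (val == "0" || val == "0.0" || val == "0.00")

def pvLoopA (row : List (Option String)) (max_vals : Int) (i : Nat) (vals : List String) : List String :=
  if _h : i < row.length ∧ (vals.length : Int) < max_vals then
    pvLoopA row max_vals ((pvStepA row i).2 + 1)
      (if (pvStepA row i).1 ≠ "" then
        (if pvKeepA (pvStepA row i).1 then vals ++ [(pvStepA row i).1] else vals)
       else vals)
  else vals
termination_by row.length - i
decreasing_by
  have := pvStepA_snd_ge row i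
  omega

def pvPadA (max_vals : Int) (vals : List String) : List String :=
  if _h : (vals.length : Int) < max_vals then pvPadA max_vals (vals ++ [""]) else vals
termination_by (max_vals - vals.length).toNat
decreasing_by
  simp
  omega

def numeric_vals_from_row_py (row : List (Option String)) (max_vals : Int) : List String :=
  pvPadA max_vals (pvLoopA row max_vals 1 [])

-- ===== PORT B =====
def pvNormB (c : Option String) : String :=
  match c with
  | none => ""
  | some s => if s = "" then "" else PySem.Str.strip s

def pvTokenChars : List Char := "0123456789.-%".toList

-- `ch in _TOKEN_CHARS` on a single char is exactly membership in the string's chars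
def pvIsValueB (tok : String) : Bool :=
  tok.toList.all (fun ch => pvTokenChars.contains ch) && tok.toList.any PySem.Chars.isdigit

def pvDashedDigitsB (tok : String) : Bool :=
  tok.toList.any PySem.Chars.isdigit &&
    tok.toList.all (fun ch => ch == '-' || PySem.Chars.isdigit ch)

-- Python's stack is cleaned[::-1] popped from the END; popping the end of the reversed
-- cleaned list is consuming the cleaned list from the head, which is how the stack is
-- modelled here (top of stack = head, stack.pop() = uncons, stack[-1] = peek at head).
def pvCollectB : List String → List String
  | [] => []
  | head :: stack =>
    match stack with
    | [] => if pvIsValueB head then [head] else []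
    | nxt :: rest =>
      if (PySem.Str.endswith head "." && pvDashedDigitsB nxt) || (head == "-" && !(nxt == "")) then
        if pvIsValueB (head ++ nxt) then (head ++ nxt) :: pvCollectB rest else pvCollectB rest
      else
        if pvIsValueB head then head :: pvCollectB (nxt :: rest) else pvCollectB (nxt :: rest)

def numeric_vals_from_row_py_alt (row : List (Option String)) (max_vals : Int) : List String :=
  let found := pvCollectB ((row.drop 1).map pvNormB)
  let out := if 0 < max_vals then found.take max_vals.toNat else []
  out ++ List.replicate (max_vals - (out.length : Int)).toNat ""

-- ===== PRECONDITION & SPEC =====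
def Spec_numeric_vals_from_row_py (row : List (Option String)) (max_vals : Int) (out : List String) : Prop := out = numeric_vals_from_row_py_alt row max_vals
instance (row : List (Option String)) (max_vals : Int) (out : List String) : Decidable (Spec_numeric_vals_from_row_py row max_vals out) := by unfold Spec_numeric_vals_from_row_py; infer_instance

-- ===== CLAIM (what is proved, stated in full; the proofs are below) =====
def Claim_equal_numeric_vals_from_row_py : Prop := ∀ (row : List (Option String)) (max_vals : Int), Dom_numeric_vals_from_row_py row max_vals → Spec_numeric_vals_from_row_py row max_vals (numeric_vals_from_row_py row max_vals)

-- ===== LEMMAS AND PROOFS =====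
theorem pvNorm_eq : pvCellA = pvNormB := by
  funext c; cases c <;> rfl

theorem pv_go_filter (d : Char) (l acc : List Char) (fuel : Nat) (h : l.length ≤ fuel) :
    PySem.Chars.replace.go [d] [] fuel l acc
      = acc.reverse ++ l.filter (fun c => !(c == d)) := by
  induction fuel generalizing l acc with
  | zero =>
    have : l = [] := by cases l <;> simp_all
    subst this; simp [PySem.Chars.replace.go]
  | succ n ih =>
    cases l with
    | nil => simp [PySem.Chars.replace.go]
    | cons c t =>
      simp only [PySem.Chars.replace.go]
      by_cases hc : c = d
      · subst hc
        rw [if_pos (by simp [List.isPrefixOf])]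
        simp only [List.length_cons] at h
        show PySem.Chars.replace.go [c] [] n (List.drop 1 (c :: t)) acc = _
        simp only [List.drop_succ_cons, List.drop_zero]
        rw [ih t acc (by omega)]
        simp
      · rw [if_neg (by simp [List.isPrefixOf]; exact fun hx => hc hx.symm)]
        simp only [List.length_cons] at h
        rw [ih t (c :: acc) (by omega)]
        simp [hc]

theorem pv_replace_filter (d : Char) (l : List Char) :
    PySem.Chars.replace l [d] [] = l.filter (fun c => !(c == d)) := by
  rw [PySem.Chars.replace, if_neg (by simp), pv_go_filter d l [] l.length le_rfl]
  simp

theorem pv_char_eq_iff (c d : Char) : (c = d) ↔ (c.toNat = d.toNat) := eq_iff_eq_of_cmp_eq_cmp rfl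

theorem pv_char_le_iff (c d : Char) : (c ≤ d) ↔ (c.toNat ≤ d.toNat) := by
  rw [Char.le_def]; exact ⟨fun h => h, fun h => h⟩

theorem pv_token_mem (c : Char) :
    pvTokenChars.contains c = (PySem.Chars.isdigit c || (c == '.' || c == '-' || c == '%')) := by
  have hl : pvTokenChars = ['0','1','2','3','4','5','6','7','8','9','.','-','%'] := by decide
  rw [Bool.eq_iff_iff, hl]
  simp only [List.contains_eq_mem, List.mem_cons, List.not_mem_nil, or_false,
    PySem.Chars.isdigit, Bool.or_eq_true, Bool.and_eq_true, decide_eq_true_eq, beq_iff_eq,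
    pv_char_eq_iff, pv_char_le_iff]
  have h0 : ('0' : Char).toNat = 48 := rfl
  have h9 : ('9' : Char).toNat = 57 := rfl
  have hdot : ('.' : Char).toNat = 46 := rfl
  have hdash : ('-' : Char).toNat = 45 := rfl
  have hpct : ('%' : Char).toNat = 37 := rfl
  have h1 : ('1' : Char).toNat = 49 := rfl
  have h2 : ('2' : Char).toNat = 50 := rfl
  have h3 : ('3' : Char).toNat = 51 := rfl
  have h4 : ('4' : Char).toNat = 52 := rfl
  have h5 : ('5' : Char).toNat = 53 := rfl
  have h6 : ('6' : Char).toNat = 54 := rfl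
  have h7 : ('7' : Char).toNat = 55 := rfl
  have h8 : ('8' : Char).toNat = 56 := rfl
  rw [h0, h9, hdot, hdash, hpct, h1, h2, h3, h4, h5, h6, h7, h8]
  omega

theorem pv_isdigit_ne_sep {c : Char} (h : PySem.Chars.isdigit c = true) :
    c ≠ '.' ∧ c ≠ '-' ∧ c ≠ '%' := by
  refine ⟨?_, ?_, ?_⟩ <;> rintro rfl <;> exact absurd h (by decide)

theorem pv_dashed_eq (nst : String) :
    PySem.Str.strIsdigit (PySem.Str.replace nst "-" "") = pvDashedDigitsB nst := by
  rw [PySem.Str.strIsdigit_eq, PySem.Str.toList_replace]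
  rw [show ("-" : String).toList = ['-'] from rfl, show ("" : String).toList = [] from rfl,
    pv_replace_filter]
  unfold pvDashedDigitsB PySem.Chars.strIsdigit
  rw [Bool.eq_iff_iff]
  simp only [Bool.and_eq_true, Bool.not_eq_eq_eq_not, Bool.not_true, List.isEmpty_eq_false_iff,
    List.all_eq_true, List.any_eq_true, ne_eq, Bool.or_eq_true, beq_iff_eq]
  constructor
  · rintro ⟨hne, hall⟩
    rcases List.exists_mem_of_ne_nil _ hne with ⟨c, hc⟩
    rcases List.mem_filter.mp hc with ⟨hcl, hcp⟩
    refine ⟨⟨c, hcl, hall c (List.mem_filter.mpr ⟨hcl, hcp⟩)⟩, ?_⟩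
    intro c hcl
    by_cases hcd : c = '-'
    · exact Or.inl hcd
    · exact Or.inr (hall c (List.mem_filter.mpr ⟨hcl, by simpa using hcd⟩))
  · rintro ⟨⟨c, hcl, hcd⟩, hall⟩
    have hcne : c ≠ '-' := (pv_isdigit_ne_sep hcd).2.1
    constructor
    · intro hnil
      have : c ∈ nst.toList.filter (fun c => !(c == '-')) :=
        List.mem_filter.mpr ⟨hcl, by simpa using hcne⟩
      simp [hnil] at this
    · intro x hx
      rcases List.mem_filter.mp hx with ⟨hxl, hxd⟩
      rcases hall x hxl with h | h
      · exact absurd h (by simpa using hxd)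
      · exact h

def pvSepFree (c : Char) : Bool := !(c == '.') && !(c == '-') && !(c == '%')

theorem pv_sepFree_iff (c : Char) : pvSepFree c = true ↔ (c ≠ '.' ∧ c ≠ '-' ∧ c ≠ '%') := by
  simp [pvSepFree, and_assoc]

theorem pv_strIsdigit_iff (l : List Char) :
    PySem.Chars.strIsdigit l = true ↔ (l ≠ [] ∧ ∀ c ∈ l, PySem.Chars.isdigit c = true) := by
  simp [PySem.Chars.strIsdigit]

theorem pv_filter3 (l : List Char) :
    ((l.filter (fun c => !(c == '.'))).filter (fun c => !(c == '-'))).filter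
        (fun c => !(c == '%')) = l.filter pvSepFree := by
  rw [List.filter_filter, List.filter_filter]
  apply List.filter_congr
  intro a _
  simp only [pvSepFree]
  cases a == '.' <;> cases a == '-' <;> cases a == '%' <;> rfl

theorem pv_keep_eq (v : String) :
    (decide (v ≠ "") && pvKeepA v) = pvIsValueB v := by
  unfold pvKeepA pvIsValueB
  dsimp only
  rw [PySem.Str.strIsdigit_eq, PySem.Str.toList_replace, PySem.Str.toList_replace,
    PySem.Str.toList_replace]
  rw [show ("." : String).toList = ['.'] from rfl, show ("-" : String).toList = ['-'] from rfl,
    show ("%" : String).toList = ['%'] from rfl, show ("" : String).toList = [] from rfl]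
  rw [pv_replace_filter, pv_replace_filter, pv_replace_filter, pv_filter3]
  by_cases hz0 : v = "0"
  · subst hz0; decide
  by_cases hz1 : v = "0.0"
  · subst hz1; decide
  by_cases hz2 : v = "0.00"
  · subst hz2; decide
  rw [show (v == "0") = false by simpa using hz0,
    show (v == "0.0") = false by simpa using hz1,
    show (v == "0.00") = false by simpa using hz2]
  rw [Bool.eq_iff_iff]
  simp only [Bool.or_false, Bool.and_eq_true, decide_eq_true_eq, pv_strIsdigit_iff,
    List.all_eq_true, List.any_eq_true, pv_token_mem, Bool.or_eq_true, beq_iff_eq]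
  constructor
  · rintro ⟨_, hfne, hall⟩
    constructor
    · intro c hcl
      by_cases hP : pvSepFree c = true
      · exact Or.inl (hall c (List.mem_filter.mpr ⟨hcl, hP⟩))
      · have hns : ¬(c ≠ '.' ∧ c ≠ '-' ∧ c ≠ '%') := fun hc => hP ((pv_sepFree_iff c).mpr hc)
        right
        by_cases h1 : c = '.'
        · exact Or.inl (Or.inl h1)
        by_cases h2 : c = '-'
        · exact Or.inl (Or.inr h2)
        by_cases h3 : c = '%'
        · exact Or.inr h3
        · exact absurd ⟨h1, h2, h3⟩ hns
    · rcases List.exists_mem_of_ne_nil _ hfne with ⟨c, hc⟩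
      exact ⟨c, (List.mem_filter.mp hc).1, hall c hc⟩
  · rintro ⟨hall, c, hcl, hcd⟩
    have hsep := pv_isdigit_ne_sep hcd
    have hcf : c ∈ v.toList.filter pvSepFree :=
      List.mem_filter.mpr ⟨hcl, (pv_sepFree_iff c).mpr hsep⟩
    refine ⟨?_, ?_, ?_⟩
    · intro hve
      subst hve
      simp at hcl
    · intro hnil
      rw [hnil] at hcf
      simp at hcf
    · intro x hx
      rcases List.mem_filter.mp hx with ⟨hxl, hxP⟩
      rcases (pv_sepFree_iff x).mp hxP with ⟨a1, a2, a3⟩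
      rcases hall x hxl with h | (h | h) | h
      · exact h
      · exact absurd h a1
      · exact absurd h a2
      · exact absurd h a3

theorem pv_emit (m : Int) (vals tail : List String) (hv : (vals.length : Int) < m) (x : String) :
    (if x ≠ "" then (if pvKeepA x then vals ++ [x] else vals) else vals)
      ++ tail.take (m - (((if x ≠ "" then (if pvKeepA x then vals ++ [x] else vals) else vals).length : Nat) : Int)).toNat
    = vals ++ (if pvIsValueB x then x :: tail else tail).take (m - (vals.length : Int)).toNat := by
  rw [← pv_keep_eq x]
  by_cases hx : x = ""
  · simp [hx]
  · cases hk : pvKeepA x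
    · simp [hx, hk]
    · simp only [hx, ne_eq, not_false_iff, decide_true, Bool.and_self, if_pos]
      have hlen : (m - ((vals.length : Nat) : Int)).toNat
          = (m - (((vals ++ [x]).length : Nat) : Int)).toNat + 1 := by
        simp only [List.length_append, List.length_cons, List.length_nil]
        omega
      rw [hlen, List.take_succ_cons, List.append_assoc]
      simp

theorem pvPadA_eq (m : Int) (vals : List String) :
    pvPadA m vals = vals ++ List.replicate (m - (vals.length : Int)).toNat "" := by
  generalize hk : (m - (vals.length : Int)).toNat = k
  induction k generalizing vals with
  | zero =>
    rw [pvPadA, dif_neg (by omega)]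
    simp
  | succ k ih =>
    rw [pvPadA, dif_pos (by omega)]
    rw [ih (vals ++ [""]) (by simp; omega)]
    simp [List.replicate_succ]

theorem pvCollectB_merge (a b : String) (l : List String)
    (h : (PySem.Str.endswith a "." && pvDashedDigitsB b || (a == "-" && !(b == ""))) = true) :
    pvCollectB (a :: b :: l)
      = if pvIsValueB (a ++ b) then (a ++ b) :: pvCollectB l else pvCollectB l := by
  simp only [pvCollectB]
  rw [if_pos h]

theorem pvCollectB_skip (a b : String) (l : List String)
    (h : (PySem.Str.endswith a "." && pvDashedDigitsB b || (a == "-" && !(b == ""))) = false) :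
    pvCollectB (a :: b :: l)
      = if pvIsValueB a then a :: pvCollectB (b :: l) else pvCollectB (b :: l) := by
  simp only [pvCollectB]
  rw [if_neg (by rw [h]; simp)]

theorem pvLoopA_eq (n : Nat) (row : List (Option String)) (m : Int) (i : Nat) (vals : List String)
    (hn : row.length - i ≤ n) :
    pvLoopA row m i vals
      = vals ++ (pvCollectB ((row.drop i).map pvNormB)).take (m - (vals.length : Int)).toNat := by
  induction n generalizing i vals with
  | zero =>
    have hi : ¬ i < row.length := by omega
    rw [pvLoopA, dif_neg (by tauto), List.drop_of_length_le (by omega)]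
    simp [pvCollectB]
  | succ n ih =>
    by_cases hi : i < row.length
    case neg =>
      rw [pvLoopA, dif_neg (by tauto), List.drop_of_length_le (by omega)]
      simp [pvCollectB]
    by_cases hv : (vals.length : Int) < m
    case neg =>
      rw [pvLoopA, dif_neg (by tauto)]
      have h0 : (m - (vals.length : Int)).toNat = 0 := by omega
      rw [h0]
      simp
    rw [pvLoopA, dif_pos ⟨hi, hv⟩]
    have hval : pvCellA (row.getD i none) = pvNormB row[i] := by
      rw [List.getD_eq_getElem row none hi, pvNorm_eq]
    have hdrop : row.drop i = row[i] :: row.drop (i + 1) := List.drop_eq_getElem_cons hi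
    by_cases h2 : i + 1 < row.length
    case neg =>
      -- last cell: no merge possible
      have hstep : pvStepA row i = (pvNormB row[i], i) := by
        unfold pvStepA
        dsimp only
        rw [hval, show decide (i + 1 < row.length) = false by simpa using h2]
        simp
      rw [hstep]
      rw [ih (i + 1) _ (by omega)]
      rw [hdrop, show List.drop (i + 1) row = [] from List.drop_of_length_le (by omega)]
      simp only [List.map_cons, List.map_nil]
      rw [show pvCollectB ([] : List String) = [] from rfl,
        show pvCollectB [pvNormB row[i]]
          = if pvIsValueB (pvNormB row[i]) then [pvNormB row[i]] else [] from rfl]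
      exact pv_emit m vals [] hv (pvNormB row[i])
    -- there is a next cell
    have hnxt : pvCellA (row.getD (i + 1) none) = pvNormB row[i + 1] := by
      rw [List.getD_eq_getElem row none h2, pvNorm_eq]
    have hdrop2 : row.drop (i + 1) = row[i + 1] :: row.drop (i + 2) := List.drop_eq_getElem_cons h2
    have hd2 : decide (i + 1 < row.length) = true := by simpa using h2
    have hcoll : pvCollectB ((row.drop i).map pvNormB)
        = pvCollectB (pvNormB row[i] :: pvNormB row[i + 1] :: (row.drop (i + 2)).map pvNormB) := by
      rw [hdrop]
      simp only [List.map_cons]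
      rw [hdrop2]
      simp only [List.map_cons]
    by_cases hend : PySem.Str.endswith (pvNormB row[i]) "." = true
    · by_cases hdshd : pvDashedDigitsB (pvNormB row[i + 1]) = true
      · -- merge on trailing dot
        have hdig : PySem.Str.strIsdigit (PySem.Str.replace (pvNormB row[i + 1]) "-" "") = true := by
          rw [pv_dashed_eq]; exact hdshd
        have hstep : pvStepA row i = (pvNormB row[i] ++ pvNormB row[i + 1], i + 1) := by
          unfold pvStepA
          dsimp only
          rw [hval, hnxt, hd2, hend, if_pos (show (true && true) = true from rfl), if_pos hdig]
        rw [hstep]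
        dsimp only
        rw [ih (i + 2) _ (by omega), hcoll]
        rw [pvCollectB_merge _ _ _ (by rw [hend, hdshd]; rfl)]
        exact pv_emit m vals _ hv _
      · -- trailing dot but next is not dashed digits: keep val alone
        have hdshdf : pvDashedDigitsB (pvNormB row[i + 1]) = false := by simpa using hdshd
        have hdigf : PySem.Str.strIsdigit (PySem.Str.replace (pvNormB row[i + 1]) "-" "") = false := by
          rw [pv_dashed_eq]; exact hdshdf
        have hne_dash : (pvNormB row[i] == "-") = false := by
          by_cases hq : pvNormB row[i] = "-"
          · rw [hq] at hend; exact absurd hend (by decide)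
          · simpa using hq
        have hstep : pvStepA row i = (pvNormB row[i], i) := by
          unfold pvStepA
          dsimp only
          rw [hval, hnxt, hd2, hend, if_pos (show (true && true) = true from rfl), hdigf,
            if_neg (by simp)]
        rw [hstep]
        dsimp only
        rw [ih (i + 1) _ (by omega), hdrop2]
        simp only [List.map_cons]
        rw [hcoll]
        rw [pvCollectB_skip _ _ _ (by rw [hend, hdshdf, hne_dash]; rfl)]
        exact pv_emit m vals _ hv _
    · have hendf : PySem.Str.endswith (pvNormB row[i]) "." = false := by simpa using hend
      by_cases hdash : pvNormB row[i] = "-"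
      · have hdasht : (pvNormB row[i] == "-") = true := by simpa using hdash
        by_cases hnx : pvNormB row[i + 1] = ""
        · -- "-" with empty next: no merge, "-" is then filtered out
          have hnxt_t : (pvNormB row[i + 1] == "") = true := by simpa using hnx
          have hstep : pvStepA row i = (pvNormB row[i], i) := by
            unfold pvStepA
            dsimp only
            rw [hval, hnxt, hd2, hendf, if_neg (by simp), hdasht,
              if_pos (show (true && true) = true from rfl), if_neg (by simpa using hnx)]
          rw [hstep]
          dsimp only
          rw [ih (i + 1) _ (by omega), hdrop2]
          simp only [List.map_cons]
          rw [hcoll]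
          rw [pvCollectB_skip _ _ _ (by rw [hendf, hnxt_t, hdasht]; rfl)]
          exact pv_emit m vals _ hv _
        · -- "-" merged with non-empty next
          have hnxt_f : (pvNormB row[i + 1] == "") = false := by simpa using hnx
          have hstep : pvStepA row i = (pvNormB row[i] ++ pvNormB row[i + 1], i + 1) := by
            unfold pvStepA
            dsimp only
            rw [hval, hnxt, hd2, hendf, if_neg (by simp), hdasht,
              if_pos (show (true && true) = true from rfl), if_pos hnx]
          rw [hstep]
          dsimp only
          rw [ih (i + 2) _ (by omega), hcoll]
          rw [pvCollectB_merge _ _ _ (by rw [hendf, hdasht, hnxt_f]; rfl)]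
          exact pv_emit m vals _ hv _
      · -- neither merge condition
        have hdashf : (pvNormB row[i] == "-") = false := by simpa using hdash
        have hstep : pvStepA row i = (pvNormB row[i], i) := by
          unfold pvStepA
          dsimp only
          rw [hval, hd2, hendf, if_neg (by simp), hdashf, if_neg (by simp)]
        rw [hstep]
        dsimp only
        rw [ih (i + 1) _ (by omega), hdrop2]
        simp only [List.map_cons]
        rw [hcoll]
        rw [pvCollectB_skip _ _ _ (by rw [hendf, hdashf]; rfl)]
        exact pv_emit m vals _ hv _

-- ===== VERDICT (by name: the statement is the Claim_ definition above) =====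
theorem numeric_vals_from_row_py_spec : Claim_equal_numeric_vals_from_row_py := by
  intro row m _
  unfold Spec_numeric_vals_from_row_py numeric_vals_from_row_py numeric_vals_from_row_py_alt
  rw [pvLoopA_eq row.length row m 1 [] (by omega), pvPadA_eq]
  by_cases hm : 0 < m
  · simp [hm]
  · have h0 : m.toNat = 0 := by omega
    simp [hm, h0]
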